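-- pv_equiv track=rewrite | github.com/AUT-Cloud-Lab/MineDraft | tools/makefile_gen.py | generate_result_str
-- ===== SOURCE A (Python) =====
-- def generate_result_str(kind, script_name, report_dir_names, report_file_count):
--     result_str = f"{kind}_{script_name}:\n"
--
--     for report_dir_name in report_dir_names:
--         parent_dir_name, child_dir_name = script_name.rsplit("_", 1)
--         result_dir_name = f"./results/{parent_dir_name}/{child_dir_name}/{report_dir_name}"
--
--         history_paths = r""""""
--         for it in range(1, report_file_count + 1):
--             report_filename = f"{report_dir_name}_{it}.json"
--             base_history_paths = rf"        reports/ecmus/$(date_ecmus)/{report_dir_name}/{report_filename} \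
--                 reports/kube-schedule/$(date_kube_schedule)/{report_dir_name}/{report_filename} \
--                 reports/ecmus-no-migration/$(date_ecmus_no_migration)/{report_dir_name}/{report_filename} \
--                 reports/random-scheduler/$(date_random)/{report_dir_name}/{report_filename} \
--                 reports/cloud-first-scheduler/$(date_cloud_first)/{report_dir_name}/{report_filename} \
--                 reports/smallest-edge-first-scheduler/$(date_smallest_edge_first)/{report_dir_name}/{report_filename} \
--                 reports/biggest-edge-first-scheduler/$(date_biggest_edge_first)/{report_dir_name}/{report_filename} \
--                 reports/ecmus-qos-aware/$(date_ecmus_qos_aware)/{report_dir_name}/{report_filename} " + "\\"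
--
--             if it != report_file_count:
--                 base_history_paths += "\n"
--
--             history_paths += base_history_paths
--
--         command_str = "\t python3 main.py \\\n" + rf"""    --script_name {script_name} \
--             --config_path config.json \
--             --history_paths \
--         {history_paths}
--             --scenario-name {report_dir_name} \
--             --save-path {result_dir_name}
--         """
--
--         command_str += "\n"
--         result_str += command_str
--
--     return result_str
-- ===== SOURCE B (Python) =====
-- SCHEDULERS = [
--     ("ecmus", "date_ecmus"),
--     ("kube-schedule", "date_kube_schedule"),
--     ("ecmus-no-migration", "date_ecmus_no_migration"),
--     ("random-scheduler", "date_random"),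
--     ("cloud-first-scheduler", "date_cloud_first"),
--     ("smallest-edge-first-scheduler", "date_smallest_edge_first"),
--     ("biggest-edge-first-scheduler", "date_biggest_edge_first"),
--     ("ecmus-qos-aware", "date_ecmus_qos_aware"),
-- ]
--
--
-- def _command(script_name, d, report_file_count):
--     sep = " \\\n                "
--     chunks = []
--     for it in range(1, report_file_count + 1):
--         fn = f"{d}_{it}.json"
--         paths = sep.join(f"reports/{seg}/$({var})/{d}/{fn}" for seg, var in SCHEDULERS)
--         chunks.append("        " + paths + " \\")
--     history = "\n".join(chunks)
--     i = script_name.rindex("_")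
--     return ("\t python3 main.py \\\n"
--             f"    --script_name {script_name} \\\n"
--             f"            --config_path config.json \\\n"
--             f"            --history_paths \\\n"
--             f"        {history}\n"
--             f"            --scenario-name {d} \\\n"
--             f"            --save-path ./results/{script_name[:i]}/{script_name[i + 1:]}/{d}\n"
--             "        \n")
--
--
-- def generate_result_str(kind, script_name, report_dir_names, report_file_count):
--     return f"{kind}_{script_name}:\n" + "".join(
--         _command(script_name, d, report_file_count) for d in report_dir_names)
-- ===== Notes on version B (the rewrite author's own statement) =====
-- stated objective: simpler
-- what changed: Replaces A's hard-coded eight-line raw-string block and manual last-iteration newline bookkeeping with a data table of (scheduler, date-variable) pairs formatted by one comprehension and str.join calls (join for the path separator, for the per-iteration newline, and for concatenating the per-directory commands).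
import Mathlib
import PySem

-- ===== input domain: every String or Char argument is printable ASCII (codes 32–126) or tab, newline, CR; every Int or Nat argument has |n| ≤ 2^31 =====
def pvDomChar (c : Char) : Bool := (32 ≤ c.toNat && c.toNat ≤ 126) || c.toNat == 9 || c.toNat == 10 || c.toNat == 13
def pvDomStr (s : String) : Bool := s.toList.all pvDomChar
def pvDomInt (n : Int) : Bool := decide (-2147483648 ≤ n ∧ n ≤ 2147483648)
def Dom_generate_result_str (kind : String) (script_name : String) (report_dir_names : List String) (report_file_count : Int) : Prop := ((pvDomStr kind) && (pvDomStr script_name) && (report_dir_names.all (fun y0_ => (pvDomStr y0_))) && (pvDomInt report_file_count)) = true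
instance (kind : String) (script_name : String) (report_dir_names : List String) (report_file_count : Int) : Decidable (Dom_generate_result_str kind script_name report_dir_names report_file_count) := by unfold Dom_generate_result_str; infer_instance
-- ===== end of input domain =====

-- B replaces A's hard-coded eight-line raw-string block and manual last-iteration newline bookkeeping by a
-- data table of the eight (scheduler, date-variable) pairs and str.join calls (objective: simpler).

-- ===== PORT A =====
def generate_result_str (kind : String) (script_name : String) (report_dir_names : List String) (report_file_count : Int) : String :=
  report_dir_names.foldl (fun result_str report_dir_name =>
    -- script_name.rsplit("_", 1) ported by hand via rfind: exact whenever "_" occurs in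
    -- script_name (guaranteed by Pre_ when this loop body runs; otherwise Python raises ValueError)
    let i := PySem.Str.rfind script_name "_"
    let parent_dir_name := PySem.Str.slice script_name none (some i)
    let child_dir_name := PySem.Str.slice script_name (some (i + 1)) none
    let result_dir_name := "./results/" ++ parent_dir_name ++ "/" ++ child_dir_name ++ "/" ++ report_dir_name
    let history_paths := (PySem.List.pyRange 1 (report_file_count + 1) 1).foldl (fun hp it =>
      let report_filename := report_dir_name ++ "_" ++ PySem.Int.toStr it ++ ".json"
      let base_history_paths :=
        "        reports/ecmus/$(date_ecmus)/" ++ report_dir_name ++ "/" ++ report_filename ++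
        " \\\n                reports/kube-schedule/$(date_kube_schedule)/" ++ report_dir_name ++ "/" ++ report_filename ++
        " \\\n                reports/ecmus-no-migration/$(date_ecmus_no_migration)/" ++ report_dir_name ++ "/" ++ report_filename ++
        " \\\n                reports/random-scheduler/$(date_random)/" ++ report_dir_name ++ "/" ++ report_filename ++
        " \\\n                reports/cloud-first-scheduler/$(date_cloud_first)/" ++ report_dir_name ++ "/" ++ report_filename ++
        " \\\n                reports/smallest-edge-first-scheduler/$(date_smallest_edge_first)/" ++ report_dir_name ++ "/" ++ report_filename ++
        " \\\n                reports/biggest-edge-first-scheduler/$(date_biggest_edge_first)/" ++ report_dir_name ++ "/" ++ report_filename ++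
        " \\\n                reports/ecmus-qos-aware/$(date_ecmus_qos_aware)/" ++ report_dir_name ++ "/" ++ report_filename ++
        " " ++ "\\"
      let base_history_paths := if it ≠ report_file_count then base_history_paths ++ "\n" else base_history_paths
      hp ++ base_history_paths) ""
    let command_str := "\t python3 main.py \\\n" ++
      "    --script_name " ++ script_name ++ " \\\n            --config_path config.json \\\n            --history_paths \\\n        " ++
      history_paths ++ "\n            --scenario-name " ++ report_dir_name ++ " \\\n            --save-path " ++
      result_dir_name ++ "\n        "
    let command_str := command_str ++ "\n"
    result_str ++ command_str) (kind ++ "_" ++ script_name ++ ":\n")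

-- ===== PORT B =====
def pvSchedulers : List (String × String) :=
  [("ecmus", "date_ecmus"),
   ("kube-schedule", "date_kube_schedule"),
   ("ecmus-no-migration", "date_ecmus_no_migration"),
   ("random-scheduler", "date_random"),
   ("cloud-first-scheduler", "date_cloud_first"),
   ("smallest-edge-first-scheduler", "date_smallest_edge_first"),
   ("biggest-edge-first-scheduler", "date_biggest_edge_first"),
   ("ecmus-qos-aware", "date_ecmus_qos_aware")]

def pvCommand (script_name : String) (d : String) (report_file_count : Int) : String :=
  let sep := " \\\n                "
  let chunks := (PySem.List.pyRange 1 (report_file_count + 1) 1).map (fun it =>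
    let fn := d ++ "_" ++ PySem.Int.toStr it ++ ".json"
    let paths := PySem.Str.join sep
      (pvSchedulers.map (fun p => "reports/" ++ p.1 ++ "/$(" ++ p.2 ++ ")/" ++ d ++ "/" ++ fn))
    "        " ++ paths ++ " \\")
  let history := PySem.Str.join "\n" chunks
  -- script_name.rindex("_") ported via rfind (exact when "_" occurs; otherwise Python raises ValueError)
  let i := PySem.Str.rfind script_name "_"
  "\t python3 main.py \\\n" ++
  "    --script_name " ++ script_name ++ " \\\n" ++
  "            --config_path config.json \\\n" ++
  "            --history_paths \\\n" ++
  "        " ++ history ++ "\n" ++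
  "            --scenario-name " ++ d ++ " \\\n" ++
  "            --save-path ./results/" ++ PySem.Str.slice script_name none (some i) ++ "/" ++
  PySem.Str.slice script_name (some (i + 1)) none ++ "/" ++ d ++ "\n" ++
  "        \n"

def generate_result_str_alt (kind : String) (script_name : String) (report_dir_names : List String) (report_file_count : Int) : String :=
  kind ++ "_" ++ script_name ++ ":\n" ++
  PySem.Str.join "" (report_dir_names.map (fun d => pvCommand script_name d report_file_count))

-- ===== PRECONDITION & SPEC =====
-- Pre_ excludes exactly the inputs on which Python A raises ValueError: a nonempty report_dir_names
-- with no "_" in script_name makes `script_name.rsplit("_", 1)` yield one piece, so the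
-- two-variable unpacking fails (B's rindex raises there too).
def Pre_generate_result_str (kind : String) (script_name : String) (report_dir_names : List String) (report_file_count : Int) : Prop :=
  report_dir_names = [] ∨ PySem.Str.isIn "_" script_name = true
instance (kind : String) (script_name : String) (report_dir_names : List String) (report_file_count : Int) : Decidable (Pre_generate_result_str kind script_name report_dir_names report_file_count) := by unfold Pre_generate_result_str; infer_instance
def pvWitness_generate_result_str : String × String × List String × Int := ("make", "sim_run", ["s1"], 2)

def Spec_generate_result_str (kind : String) (script_name : String) (report_dir_names : List String) (report_file_count : Int) (out : String) : Prop := out = generate_result_str_alt kind script_name report_dir_names report_file_count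
instance (kind : String) (script_name : String) (report_dir_names : List String) (report_file_count : Int) (out : String) : Decidable (Spec_generate_result_str kind script_name report_dir_names report_file_count out) := by unfold Spec_generate_result_str; infer_instance

-- ===== CLAIM (what is proved, stated in full; the proofs are below) =====
def Claim_equal_generate_result_str : Prop := ∀ (kind : String) (script_name : String) (report_dir_names : List String) (report_file_count : Int), Dom_generate_result_str kind script_name report_dir_names report_file_count → Pre_generate_result_str kind script_name report_dir_names report_file_count → Spec_generate_result_str kind script_name report_dir_names report_file_count (generate_result_str kind script_name report_dir_names report_file_count)

-- ===== LEMMAS AND PROOFS =====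

theorem pv_join_cons_cons (sep a b : String) (l : List String) :
    PySem.Str.join sep (a :: b :: l) = a ++ sep ++ PySem.Str.join sep (b :: l) := by
  show String.ofList (PySem.Chars.join sep.toList (a.toList :: b.toList :: l.map String.toList)) = _
  simp only [PySem.Chars.join, List.intercalate, List.intersperse, List.flatten, List.append_eq]
  rw [← List.append_assoc, String.ofList_append, String.ofList_append]
  simp [PySem.Str.join, PySem.Chars.join, List.intercalate]

theorem pv_join_singleton (sep a : String) : PySem.Str.join sep [a] = a := by
  simp [PySem.Str.join, PySem.Chars.join, List.intercalate]

theorem pv_join_nil (sep : String) : PySem.Str.join sep ([] : List String) = "" := by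
  simp [PySem.Str.join, PySem.Chars.join, List.intercalate]

theorem pv_join_cons_ne (sep a : String) (l : List String) (h : l ≠ []) :
    PySem.Str.join sep (a :: l) = a ++ sep ++ PySem.Str.join sep l := by
  cases l with
  | nil => exact absurd rfl h
  | cons b t => exact pv_join_cons_cons sep a b t

theorem pv_join_empty_cons (a : String) (l : List String) :
    PySem.Str.join "" (a :: l) = a ++ PySem.Str.join "" l := by
  cases l with
  | nil => simp [pv_join_singleton, pv_join_nil]
  | cons b t => rw [pv_join_cons_cons]; simp

-- the outer loop: a foldl-append accumulator is init ++ "".join(map f l)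
theorem pv_foldl_append_join (f : String → String) (l : List String) (init : String) :
    l.foldl (fun acc d => acc ++ f d) init = init ++ PySem.Str.join "" (l.map f) := by
  induction l generalizing init with
  | nil => simp [pv_join_nil]
  | cons a t ih => simp only [List.foldl_cons, List.map_cons, ih, pv_join_empty_cons,
      String.append_assoc]

-- the inner loop: appending "\n" on every iteration but the last is "\n".join
theorem pv_foldl_last_newline_aux (g : Int → String) (n : Int) (xs : List Int)
    (h : ∀ x ∈ xs, x ≠ n) (acc : String) :
    (xs ++ [n]).foldl (fun hp it => hp ++ (if it ≠ n then g it ++ "\n" else g it)) acc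
      = acc ++ PySem.Str.join "\n" ((xs ++ [n]).map g) := by
  induction xs generalizing acc with
  | nil => simp [pv_join_singleton]
  | cons x t ih =>
    have hx : x ≠ n := h x (List.mem_cons_self ..)
    have ht : ∀ y ∈ t, y ≠ n := fun y hy => h y (List.mem_cons_of_mem _ hy)
    simp only [List.cons_append, List.foldl_cons, if_pos hx, List.map_cons, ih ht]
    rw [pv_join_cons_ne _ _ _ (by simp)]
    simp [String.append_assoc]

theorem pv_foldl_last_newline (g : Int → String) (n : Int) :
    (PySem.List.pyRange 1 (n + 1) 1).foldl
        (fun hp it => hp ++ (if it ≠ n then g it ++ "\n" else g it)) ""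
      = PySem.Str.join "\n" ((PySem.List.pyRange 1 (n + 1) 1).map g) := by
  by_cases hn : 1 ≤ n
  · rw [PySem.List.pyRange_one_succ_right (by omega : (1:Int) ≤ n)]
    rw [pv_foldl_last_newline_aux g n _ (fun x hx => by
      have := (PySem.List.mem_pyRange_one).1 hx; omega)]
    simp
  · rw [PySem.List.pyRange_one_eq_nil (by omega : n + 1 ≤ 1)]
    simp [pv_join_nil]

-- per report dir: A's command string equals B's pvCommand
set_option maxRecDepth 16384 in
set_option maxHeartbeats 2000000 in
theorem pv_command_eq (script_name d : String) (n : Int) :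
    (let i := PySem.Str.rfind script_name "_"
     let parent_dir_name := PySem.Str.slice script_name none (some i)
     let child_dir_name := PySem.Str.slice script_name (some (i + 1)) none
     let result_dir_name := "./results/" ++ parent_dir_name ++ "/" ++ child_dir_name ++ "/" ++ d
     let history_paths := (PySem.List.pyRange 1 (n + 1) 1).foldl (fun hp it =>
       let report_filename := d ++ "_" ++ PySem.Int.toStr it ++ ".json"
       let base_history_paths :=
         "        reports/ecmus/$(date_ecmus)/" ++ d ++ "/" ++ report_filename ++
         " \\\n                reports/kube-schedule/$(date_kube_schedule)/" ++ d ++ "/" ++ report_filename ++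
         " \\\n                reports/ecmus-no-migration/$(date_ecmus_no_migration)/" ++ d ++ "/" ++ report_filename ++
         " \\\n                reports/random-scheduler/$(date_random)/" ++ d ++ "/" ++ report_filename ++
         " \\\n                reports/cloud-first-scheduler/$(date_cloud_first)/" ++ d ++ "/" ++ report_filename ++
         " \\\n                reports/smallest-edge-first-scheduler/$(date_smallest_edge_first)/" ++ d ++ "/" ++ report_filename ++
         " \\\n                reports/biggest-edge-first-scheduler/$(date_biggest_edge_first)/" ++ d ++ "/" ++ report_filename ++
         " \\\n                reports/ecmus-qos-aware/$(date_ecmus_qos_aware)/" ++ d ++ "/" ++ report_filename ++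
         " " ++ "\\"
       let base_history_paths := if it ≠ n then base_history_paths ++ "\n" else base_history_paths
       hp ++ base_history_paths) ""
     let command_str := "\t python3 main.py \\\n" ++
       "    --script_name " ++ script_name ++ " \\\n            --config_path config.json \\\n            --history_paths \\\n        " ++
       history_paths ++ "\n            --scenario-name " ++ d ++ " \\\n            --save-path " ++
       result_dir_name ++ "\n        "
     command_str ++ "\n")
    = pvCommand script_name d n := by
  simp only [pvCommand, pvSchedulers, List.map_cons, List.map_nil,
    pv_join_cons_cons, pv_join_singleton]
  rw [pv_foldl_last_newline]
  rw [← String.toList_inj]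
  simp [String.append_assoc]
  refine congrArg _ (List.map_congr_left fun it _ => ?_)
  simp

-- ===== VERDICT (by name: the statement is the Claim_ definition above) =====
theorem generate_result_str_spec : Claim_equal_generate_result_str := by
  intro kind script_name report_dir_names report_file_count _ _
  show _ = _
  unfold generate_result_str generate_result_str_alt
  simp only [pv_command_eq]
  rw [pv_foldl_append_join (fun d => pvCommand script_name d report_file_count)]
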